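-- pv_equiv track=rewrite | github.com/bupengju/badou-jingpin | 134-卜朋举/week04/calc_tfidf.py | calc_word_doc_count
-- ===== SOURCE A (Python) =====
-- import collections
--
-- def calc_word_doc_count(token_dict):
--     word_count_dict = collections.defaultdict(dict)
--     doc_count_dict = collections.defaultdict(set)
--     for key, words in token_dict.items():
--         for word in words:
--             word_count_dict[key][word] = word_count_dict[key].get(word, 0) + 1
--             doc_count_dict[word].add(key)
--     doc_count_dict = {key: len(value) for key, value in doc_count_dict.items()}
--     return word_count_dict, doc_count_dict
-- ===== SOURCE B (Python) =====
-- import collections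
--
-- def calc_word_doc_count(token_dict):
--     word_count_dict = collections.defaultdict(dict)
--     doc_count_dict = {}
--     for key, words in token_dict.items():
--         if not words:
--             continue
--         counts = {}
--         for w in words:
--             counts[w] = counts.get(w, 0) + 1
--         word_count_dict[key] = counts
--         for w in counts:
--             doc_count_dict[w] = doc_count_dict.get(w, 0) + 1
--     return word_count_dict, doc_count_dict
-- ===== Notes on version B (the rewrite author's own statement) =====
-- stated objective: simpler
-- what changed: B drops A's defaultdict(set)-of-doc-keys bookkeeping and len() comprehension: it builds each document's word counter standalone, installs it, and increments document frequencies directly from the counter's distinct keys, so no sets are ever materialised.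
import Mathlib
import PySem

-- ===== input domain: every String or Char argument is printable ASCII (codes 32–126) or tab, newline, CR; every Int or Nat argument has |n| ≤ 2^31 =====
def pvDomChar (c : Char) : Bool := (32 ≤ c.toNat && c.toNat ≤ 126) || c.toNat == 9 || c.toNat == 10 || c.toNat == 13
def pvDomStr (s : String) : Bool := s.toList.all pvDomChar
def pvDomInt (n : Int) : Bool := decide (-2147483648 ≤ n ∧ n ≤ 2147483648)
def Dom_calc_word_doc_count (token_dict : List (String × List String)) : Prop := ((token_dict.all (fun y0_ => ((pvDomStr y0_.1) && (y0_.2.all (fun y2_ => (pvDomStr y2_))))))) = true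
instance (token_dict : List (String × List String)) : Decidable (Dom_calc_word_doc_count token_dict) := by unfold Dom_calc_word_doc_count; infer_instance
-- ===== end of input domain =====

-- B replaces A's joint pass with per-document defaultdict(set) bookkeeping by a standalone
-- per-document counter whose distinct keys directly increment the document-frequency dict (objective: simpler).

-- ===== PORT A =====
def calc_word_doc_count (token_dict : List (String × List String)) :
    (List (String × List (String × Int))) × (List (String × Int)) :=
  let st := token_dict.foldl
    (fun (st : PySem.Dict String (PySem.Dict String Int) × PySem.Dict String (PySem.Set String)) kv =>
      kv.2.foldl
        (fun st word =>
          (st.1.insert kv.1 ((st.1.getD kv.1 PySem.Dict.empty).insert word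
              ((st.1.getD kv.1 PySem.Dict.empty).getD word 0 + 1)),
           st.2.insert word (PySem.Set.add (st.2.getD word PySem.Set.empty) kv.1)))
        st)
    (PySem.Dict.empty, PySem.Dict.empty)
  (st.1.items.map (fun p => (p.1, p.2.items)),
   st.2.items.map (fun p => (p.1, PySem.Set.len p.2)))

-- ===== PORT B =====
def calc_word_doc_count_alt (token_dict : List (String × List String)) :
    (List (String × List (String × Int))) × (List (String × Int)) :=
  let st := token_dict.foldl
    (fun (st : PySem.Dict String (PySem.Dict String Int) × PySem.Dict String Int) kv =>
      if kv.2 = [] then st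
      else
        let counts := kv.2.foldl (fun c w => c.insert w (c.getD w 0 + 1)) PySem.Dict.empty
        (st.1.insert kv.1 counts,
         counts.keys.foldl (fun d w => d.insert w (d.getD w 0 + 1)) st.2))
    (PySem.Dict.empty, PySem.Dict.empty)
  (st.1.items.map (fun p => (p.1, p.2.items)), st.2.items)

-- ===== PRECONDITION & SPEC =====
-- Pre_ excludes association lists with duplicate doc keys: they do not represent any Python dict
-- (Python's dict collapses duplicates before A ever runs).
def Pre_calc_word_doc_count (token_dict : List (String × List String)) : Prop :=
  (token_dict.map (·.1)).Nodup
instance (token_dict : List (String × List String)) : Decidable (Pre_calc_word_doc_count token_dict) := by unfold Pre_calc_word_doc_count; infer_instance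
def pvWitness_calc_word_doc_count : (List (String × List String)) :=
  [("d1", ["a", "b", "a"]), ("d2", ["b"]), ("d3", [])]

def Spec_calc_word_doc_count (token_dict : List (String × List String)) (out : (List (String × List (String × Int))) × (List (String × Int))) : Prop := out = calc_word_doc_count_alt token_dict
instance (token_dict : List (String × List String)) (out : (List (String × List (String × Int))) × (List (String × Int))) : Decidable (Spec_calc_word_doc_count token_dict out) := by unfold Spec_calc_word_doc_count; infer_instance

-- ===== CLAIM (what is proved, stated in full; the proofs are below) =====
def Claim_equal_calc_word_doc_count : Prop := ∀ (token_dict : List (String × List String)), Dom_calc_word_doc_count token_dict → Pre_calc_word_doc_count token_dict → Spec_calc_word_doc_count token_dict (calc_word_doc_count token_dict)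

-- ===== LEMMAS AND PROOFS =====
-- loop-step abbreviations for the two ports
def pvStepW (k : String) (wc : PySem.Dict String (PySem.Dict String Int)) (w : String) :
    PySem.Dict String (PySem.Dict String Int) :=
  wc.insert k ((wc.getD k PySem.Dict.empty).insert w ((wc.getD k PySem.Dict.empty).getD w 0 + 1))

def pvStepD (k : String) (dc : PySem.Dict String (PySem.Set String)) (w : String) :
    PySem.Dict String (PySem.Set String) :=
  dc.insert w (PySem.Set.add (dc.getD w PySem.Set.empty) k)

def pvInc (d : PySem.Dict String Int) (w : String) : PySem.Dict String Int :=
  d.insert w (d.getD w 0 + 1)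

def pvMapLen (dc : PySem.Dict String (PySem.Set String)) : PySem.Dict String Int :=
  PySem.Dict.mk (dc.items.map (fun p => (p.1, PySem.Set.len p.2)))

-- a fold over a product whose components do not interact splits
theorem pv_foldl_prod {α β γ : Type} (ws : List γ) (f : α → γ → α) (g : β → γ → β)
    (a : α) (b : β) :
    ws.foldl (fun st w => (f st.1 w, g st.2 w)) (a, b) = (ws.foldl f a, ws.foldl g b) := by
  induction ws generalizing a b with
  | nil => rfl
  | cons w ws ih => exact ih (f a w) (g b w)

-- re-inserting the value a key already has is the identity
theorem pv_insert_self {κ ν : Type} [BEq κ] [LawfulBEq κ] (d : PySem.Dict κ ν) (k : κ) (v : ν)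
    (hnd : d.keys.Nodup) (h : d.get? k = some v) : d.insert k v = d := by
  have hc : d.contains k = true := by
    rw [PySem.Dict.contains_eq_isSome_get?, h]; rfl
  apply PySem.Dict.ext
  rw [PySem.Dict.items_insert_of_contains _ _ hc]
  conv_rhs => rw [← List.map_id d.items]
  apply List.map_congr_left
  intro p hp
  by_cases hpk : (p.1 == k) = true
  · have hk : p.1 = k := eq_of_beq hpk
    have hg : d.get? p.1 = some p.2 := PySem.Dict.get?_of_mem_items d (by simpa using hp) hnd
    rw [hk, h] at hg
    have hv : v = p.2 := Option.some.inj hg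
    rw [← hk, hv]; simp
  · simp [hpk]

-- A's inner wc loop, once the key is present, just folds the count map
theorem pv_wc_inner_gen (k : String) (ws : List String)
    (wc : PySem.Dict String (PySem.Dict String Int)) (m : PySem.Dict String Int)
    (hnd : wc.keys.Nodup) (h : wc.get? k = some m) :
    ws.foldl (pvStepW k) wc
      = wc.insert k (ws.foldl (fun c w => c.insert w (c.getD w 0 + 1)) m) := by
  induction ws generalizing wc m with
  | nil => exact (pv_insert_self wc k m hnd h).symm
  | cons w ws ih =>
    have hm : wc.getD k PySem.Dict.empty = m := PySem.Dict.getD_of_get?_eq_some wc _ h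
    have hstep : pvStepW k wc w = wc.insert k (m.insert w (m.getD w 0 + 1)) := by
      rw [pvStepW, hm]
    rw [List.foldl_cons, hstep,
      ih (wc.insert k (m.insert w (m.getD w 0 + 1))) (m.insert w (m.getD w 0 + 1))
        (PySem.Dict.nodup_keys_insert wc k _ hnd) (PySem.Dict.get?_insert_self wc k _),
      PySem.Dict.insert_insert_self]
    rfl

-- A's inner wc loop on a fresh key appends one counter entry
theorem pv_wc_inner (k : String) (ws : List String)
    (wc : PySem.Dict String (PySem.Dict String Int))
    (hnd : wc.keys.Nodup) (h : wc.contains k = false) (hne : ws ≠ []) :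
    ws.foldl (pvStepW k) wc
      = wc.insert k (ws.foldl (fun c w => c.insert w (c.getD w 0 + 1)) PySem.Dict.empty) := by
  cases ws with
  | nil => exact absurd rfl hne
  | cons w ws =>
    have hm : wc.getD k PySem.Dict.empty = PySem.Dict.empty :=
      PySem.Dict.getD_of_not_contains wc _ h
    have hstep : pvStepW k wc w
        = wc.insert k (PySem.Dict.empty.insert w (PySem.Dict.empty.getD w 0 + 1)) := by
      rw [pvStepW, hm]
    rw [List.foldl_cons, hstep,
      pv_wc_inner_gen k ws _ _ (PySem.Dict.nodup_keys_insert wc k _ hnd)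
        (PySem.Dict.get?_insert_self wc k _),
      PySem.Dict.insert_insert_self]
    rfl

theorem pv_keys_mapLen (dc : PySem.Dict String (PySem.Set String)) :
    (pvMapLen dc).keys = dc.keys := by
  simp [pvMapLen, PySem.Dict.keys]

theorem pv_contains_mapLen (dc : PySem.Dict String (PySem.Set String)) (w : String) :
    (pvMapLen dc).contains w = dc.contains w := by
  have h1 := PySem.Dict.contains_eq_decide_mem_keys (pvMapLen dc) w
  have h2 := PySem.Dict.contains_eq_decide_mem_keys dc w
  rw [h1, h2, pv_keys_mapLen]

theorem pv_getD_mapLen (dc : PySem.Dict String (PySem.Set String)) (w : String)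
    (hnd : dc.keys.Nodup) :
    (pvMapLen dc).getD w 0 = ((dc.getD w PySem.Set.empty : List String).length : Int) := by
  cases hg : dc.get? w with
  | some s =>
    have hmem : (w, PySem.Set.len s) ∈ (pvMapLen dc).items := by
      simp only [pvMapLen]
      exact List.mem_map.mpr ⟨(w, s), PySem.Dict.mem_items_of_get?_eq_some dc hg, rfl⟩
    have hnd' : (pvMapLen dc).keys.Nodup := by rw [pv_keys_mapLen]; exact hnd
    rw [PySem.Dict.getD_of_mem_items _ hmem hnd', PySem.Dict.getD_of_get?_eq_some dc _ hg]
    rfl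
  | none =>
    have hc : dc.contains w = false := by
      rw [PySem.Dict.contains_eq_isSome_get?, hg]; rfl
    rw [PySem.Dict.getD_of_not_contains _ _ (by rw [pv_contains_mapLen]; exact hc),
      PySem.Dict.getD_of_not_contains _ _ hc]
    rfl

theorem pv_mapLen_insert (dc : PySem.Dict String (PySem.Set String)) (w : String)
    (s : PySem.Set String) :
    pvMapLen (dc.insert w s) = (pvMapLen dc).insert w (PySem.Set.len s) := by
  apply PySem.Dict.ext
  by_cases hc : dc.contains w = true
  · have hc' : (pvMapLen dc).contains w = true := by rw [pv_contains_mapLen]; exact hc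
    rw [PySem.Dict.items_insert_of_contains _ _ hc']
    simp only [pvMapLen, PySem.Dict.items_insert_of_contains _ _ hc, List.map_map]
    apply List.map_congr_left
    intro p _
    by_cases hpk : (p.1 == w) = true <;> simp [hpk, Function.comp]
  · have hc0 : dc.contains w = false := by simpa using hc
    have hc' : (pvMapLen dc).contains w = false := by rw [pv_contains_mapLen]; exact hc0
    rw [PySem.Dict.items_insert_of_not_contains _ _ hc']
    simp [pvMapLen, PySem.Dict.items_insert_of_not_contains _ _ hc0]

-- elements of the sets after A's inner dc loop: the new key or an old element
theorem pv_dc_mem (k : String) (ws : List String) :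
    ∀ (dc : PySem.Dict String (PySem.Set String)) (p : String × PySem.Set String) (x : String),
      p ∈ (ws.foldl (pvStepD k) dc).items → x ∈ p.2 →
      x = k ∨ ∃ q ∈ dc.items, x ∈ q.2 := by
  induction ws with
  | nil => intro dc p x hp hx; exact Or.inr ⟨p, hp, hx⟩
  | cons w ws ih =>
    intro dc p x hp hx
    rw [List.foldl_cons] at hp
    rcases ih (pvStepD k dc w) p x hp hx with hk | ⟨q, hq, hxq⟩
    · exact Or.inl hk
    · rcases (PySem.Dict.mem_items_insert _ _ _ _).mp hq with hq1 | ⟨hq2, _⟩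
      · have hxs : x ∈ PySem.Set.add (dc.getD w PySem.Set.empty) k := by
          rw [hq1] at hxq; exact hxq
        rcases (PySem.Set.mem_add _ _ _).mp hxs with hs | hk
        · cases hg : dc.get? w with
          | some s =>
            refine Or.inr ⟨(w, s), PySem.Dict.mem_items_of_get?_eq_some dc hg, ?_⟩
            rwa [PySem.Dict.getD_of_get?_eq_some dc _ hg] at hs
          | none =>
            have : dc.contains w = false := by
              rw [PySem.Dict.contains_eq_isSome_get?, hg]; rfl
            rw [PySem.Dict.getD_of_not_contains dc _ this] at hs
            exact absurd hs (List.not_mem_nil)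
        · exact Or.inl hk
      · exact Or.inr ⟨q, hq2, hxq⟩

-- the length image of A's inner dc loop is B's increment loop over the not-yet-seen words
theorem pv_dc_inner_gen (k : String) (ws : List String)
    (dc : PySem.Dict String (PySem.Set String)) (hnd : dc.keys.Nodup) :
    pvMapLen (ws.foldl (pvStepD k) dc)
      = ((PySem.Set.ofList ws).filter
          (fun w => !(decide (k ∈ (dc.getD w PySem.Set.empty : List String))))).foldl
          pvInc (pvMapLen dc) := by
  induction ws generalizing dc with
  | nil => simp [PySem.Set.ofList_nil]
  | cons w ws ih =>
    rw [List.foldl_cons, PySem.Set.ofList_cons]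
    by_cases hks : k ∈ (dc.getD w PySem.Set.empty : List String)
    · -- the key is already recorded for w: the step is the identity
      have hgd : dc.get? w = some (dc.getD w PySem.Set.empty) := by
        cases hg : dc.get? w with
        | some s => rw [PySem.Dict.getD_of_get?_eq_some dc _ hg]
        | none =>
          have : dc.contains w = false := by
            rw [PySem.Dict.contains_eq_isSome_get?, hg]; rfl
          rw [PySem.Dict.getD_of_not_contains dc _ this] at hks
          exact absurd hks (List.not_mem_nil)
      have hstep : pvStepD k dc w = dc := by
        rw [pvStepD, PySem.Set.add_of_mem hks]
        exact pv_insert_self dc w _ hnd hgd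
      rw [hstep, ih dc hnd]
      congr 1
      rw [List.filter_cons_of_neg (by simpa using hks), PySem.Set.discard,
        List.filter_filter]
      apply List.filter_congr
      intro y _
      by_cases hyw : y = w
      · subst hyw
        have h1 : decide (k ∈ (dc.getD y PySem.Set.empty : List String)) = true := by
          simpa using hks
        simp
        exact hks
      · simp [hyw]
    · -- first time w is seen in this doc: the set grows by one
      have hstep : pvStepD k dc w
          = dc.insert w ((dc.getD w PySem.Set.empty : List String) ++ [k]) := by
        rw [pvStepD, PySem.Set.add_of_not_mem hks]
      rw [hstep, ih _ (PySem.Dict.nodup_keys_insert dc w _ hnd)]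
      rw [List.filter_cons_of_pos (by simpa using hks)]
      rw [List.foldl_cons]
      have hml : pvMapLen (dc.insert w ((dc.getD w PySem.Set.empty : List String) ++ [k]))
          = pvInc (pvMapLen dc) w := by
        rw [pv_mapLen_insert, pvInc, pv_getD_mapLen dc w hnd]
        congr 1
        simp [PySem.Set.len]
      rw [hml]
      congr 1
      rw [PySem.Set.discard, List.filter_filter]
      apply List.filter_congr
      intro y _
      by_cases hyw : y = w
      · subst hyw
        simp
      · have h1 : (dc.insert w ((dc.getD w ([] : List String) : List String) ++ [k])).getD y
            ([] : List String) = dc.getD y ([] : List String) := by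
          rw [PySem.Dict.getD_insert]; simp [hyw]
        have h2 : (y == w) = false := by simp [hyw]
        simp [h1, h2]

-- main induction over the documents
theorem pv_outer (rest : List (String × List String))
    (wc : PySem.Dict String (PySem.Dict String Int)) (dc : PySem.Dict String (PySem.Set String))
    (hwc : wc.keys.Nodup) (hdc : dc.keys.Nodup) (hrest : (rest.map (·.1)).Nodup)
    (hfresh : ∀ k ∈ rest.map (·.1), wc.contains k = false)
    (hsets : ∀ p ∈ dc.items, ∀ k ∈ rest.map (·.1), k ∉ p.2) :
    (rest.foldl
      (fun (st : PySem.Dict String (PySem.Dict String Int) × PySem.Dict String (PySem.Set String)) kv =>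
        kv.2.foldl (fun st word => (pvStepW kv.1 st.1 word, pvStepD kv.1 st.2 word)) st)
      (wc, dc)).1
    = (rest.foldl
      (fun (st : PySem.Dict String (PySem.Dict String Int) × PySem.Dict String Int) kv =>
        if kv.2 = [] then st
        else
          let counts := kv.2.foldl (fun c w => c.insert w (c.getD w 0 + 1)) PySem.Dict.empty
          (st.1.insert kv.1 counts, counts.keys.foldl pvInc st.2))
      (wc, pvMapLen dc)).1
    ∧ pvMapLen (rest.foldl
      (fun (st : PySem.Dict String (PySem.Dict String Int) × PySem.Dict String (PySem.Set String)) kv =>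
        kv.2.foldl (fun st word => (pvStepW kv.1 st.1 word, pvStepD kv.1 st.2 word)) st)
      (wc, dc)).2
    = (rest.foldl
      (fun (st : PySem.Dict String (PySem.Dict String Int) × PySem.Dict String Int) kv =>
        if kv.2 = [] then st
        else
          let counts := kv.2.foldl (fun c w => c.insert w (c.getD w 0 + 1)) PySem.Dict.empty
          (st.1.insert kv.1 counts, counts.keys.foldl pvInc st.2))
      (wc, pvMapLen dc)).2 := by
  induction rest generalizing wc dc with
  | nil => exact ⟨rfl, rfl⟩
  | cons kv rest ih =>
    obtain ⟨k, ws⟩ := kv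
    rw [List.foldl_cons, List.foldl_cons]
    rw [pv_foldl_prod ws (pvStepW k) (pvStepD k) wc dc]
    have hk0 : k ∉ rest.map (·.1) := (List.nodup_cons.mp hrest).1
    have hrest' : (rest.map (·.1)).Nodup := (List.nodup_cons.mp hrest).2
    by_cases hws : ws = []
    · subst hws
      simp only [List.foldl_nil]
      exact ih wc dc hwc hdc hrest'
        (fun k' hk' => hfresh k' (List.mem_cons_of_mem _ hk'))
        (fun p hp k' hk' => hsets p hp k' (List.mem_cons_of_mem _ hk'))
    · -- the wc components agree
      have hfk : wc.contains k = false := hfresh k (List.mem_cons_self)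
      have hwc1 : ws.foldl (pvStepW k) wc
          = wc.insert k (ws.foldl (fun c w => c.insert w (c.getD w 0 + 1)) PySem.Dict.empty) :=
        pv_wc_inner k ws wc hwc hfk hws
      -- the dc components agree at the length level
      have hdc1 : pvMapLen (ws.foldl (pvStepD k) dc)
          = ((ws.foldl (fun c w => c.insert w (c.getD w 0 + 1))
              (PySem.Dict.empty : PySem.Dict String Int)).keys).foldl pvInc (pvMapLen dc) := by
        have hkeys : (ws.foldl (fun c w => c.insert w (c.getD w 0 + 1))
            (PySem.Dict.empty : PySem.Dict String Int)).keys = PySem.Set.ofList ws := by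
          rw [PySem.Dict.foldl_insert_getD_add_one_eq_counter, PySem.Dict.keys_counter]
        rw [pv_dc_inner_gen k ws dc hdc, hkeys]
        congr 1
        apply List.filter_eq_self.mpr
        intro y _
        simp only [Bool.not_eq_eq_eq_not, Bool.not_true, decide_eq_false_iff_not]
        cases hg : dc.get? y with
        | some s =>
          rw [PySem.Dict.getD_of_get?_eq_some dc _ hg]
          exact hsets (y, s) (PySem.Dict.mem_items_of_get?_eq_some dc hg) k
            (List.mem_cons_self)
        | none =>
          have : dc.contains y = false := by
            rw [PySem.Dict.contains_eq_isSome_get?, hg]; rfl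
          rw [PySem.Dict.getD_of_not_contains dc _ this]
          exact List.not_mem_nil
      simp only [if_neg hws]
      rw [hwc1, ← hdc1]
      -- invariants for the remaining documents
      have hwc' : (wc.insert k (ws.foldl (fun c w => c.insert w (c.getD w 0 + 1))
          (PySem.Dict.empty : PySem.Dict String Int))).keys.Nodup :=
        PySem.Dict.nodup_keys_insert wc k _ hwc
      have hdc' : (ws.foldl (pvStepD k) dc).keys.Nodup := by
        have := PySem.Dict.nodup_keys_foldl_insert ws
          (fun d x => PySem.Set.add (d.getD x PySem.Set.empty) k) dc hdc
        simpa [pvStepD] using this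
      have hfresh' : ∀ k' ∈ rest.map (·.1),
          (wc.insert k (ws.foldl (fun c w => c.insert w (c.getD w 0 + 1))
            (PySem.Dict.empty : PySem.Dict String Int))).contains k' = false := by
        intro k' hk'
        rw [PySem.Dict.contains_insert]
        have h1 : (k' == k) = false := by
          simp only [beq_eq_false_iff_ne, ne_eq]
          intro h; exact hk0 (h ▸ hk')
        rw [h1, hfresh k' (List.mem_cons_of_mem _ hk')]
        rfl
      have hsets' : ∀ p ∈ (ws.foldl (pvStepD k) dc).items, ∀ k' ∈ rest.map (·.1),
          k' ∉ p.2 := by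
        intro p hp k' hk' hmem
        rcases pv_dc_mem k ws dc p k' hp hmem with h | ⟨q, hq, hq2⟩
        · exact hk0 (h ▸ hk')
        · exact hsets q hq k' (List.mem_cons_of_mem _ hk') hq2
      exact ih _ _ hwc' hdc' hrest' hfresh' hsets'

-- ===== VERDICT (by name: the statement is the Claim_ definition above) =====
theorem calc_word_doc_count_spec : Claim_equal_calc_word_doc_count := by
  intro td _ hpre
  unfold Spec_calc_word_doc_count
  have hA : calc_word_doc_count td
      = (((td.foldl
            (fun (st : PySem.Dict String (PySem.Dict String Int) × PySem.Dict String (PySem.Set String)) kv =>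
              kv.2.foldl (fun st word => (pvStepW kv.1 st.1 word, pvStepD kv.1 st.2 word)) st)
            (PySem.Dict.empty, PySem.Dict.empty)).1.items.map (fun p => (p.1, p.2.items))),
         ((td.foldl
            (fun (st : PySem.Dict String (PySem.Dict String Int) × PySem.Dict String (PySem.Set String)) kv =>
              kv.2.foldl (fun st word => (pvStepW kv.1 st.1 word, pvStepD kv.1 st.2 word)) st)
            (PySem.Dict.empty, PySem.Dict.empty)).2.items.map (fun p => (p.1, PySem.Set.len p.2)))) := rfl
  have hB : calc_word_doc_count_alt td
      = (((td.foldl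
            (fun (st : PySem.Dict String (PySem.Dict String Int) × PySem.Dict String Int) kv =>
              if kv.2 = [] then st
              else
                let counts := kv.2.foldl (fun c w => c.insert w (c.getD w 0 + 1)) PySem.Dict.empty
                (st.1.insert kv.1 counts, counts.keys.foldl pvInc st.2))
            (PySem.Dict.empty, pvMapLen PySem.Dict.empty)).1.items.map (fun p => (p.1, p.2.items))),
         ((td.foldl
            (fun (st : PySem.Dict String (PySem.Dict String Int) × PySem.Dict String Int) kv =>
              if kv.2 = [] then st
              else
                let counts := kv.2.foldl (fun c w => c.insert w (c.getD w 0 + 1)) PySem.Dict.empty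
                (st.1.insert kv.1 counts, counts.keys.foldl pvInc st.2))
            (PySem.Dict.empty, pvMapLen PySem.Dict.empty)).2.items)) := rfl
  obtain ⟨h1, h2⟩ := pv_outer td PySem.Dict.empty PySem.Dict.empty
    (by rw [PySem.Dict.keys_empty]; exact List.nodup_nil)
    (by rw [PySem.Dict.keys_empty]; exact List.nodup_nil)
    hpre
    (fun k _ => by rw [PySem.Dict.contains_empty])
    (fun p hp => by
      have : (PySem.Dict.empty : PySem.Dict String (PySem.Set String)).items = [] := rfl
      rw [this] at hp
      exact absurd hp (List.not_mem_nil))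
  rw [hA, hB, h1, ← h2]
  rfl
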